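-- pv_equiv track=rewrite | github.com/forever404/everctf2018 | Crypto/streamgame/streamgame.py | lfsr
-- ===== SOURCE A (Python) =====
-- def lfsr(R,mask):
--     output = (R << 1) & 0xffffff
--     i=(R&mask)&0xffffff
--     lastbit=0
--     while i!=0:
--         lastbit^=(i&1)
--         i=i>>1
--     output^=lastbit
--     return (output,lastbit)
-- ===== SOURCE B (Python) =====
-- def lfsr(R, mask):
--     output = (R << 1) & 0xffffff
--     i = (R & mask) & 0xffffff
--     i ^= i >> 16
--     i ^= i >> 8
--     i ^= i >> 4
--     i ^= i >> 2
--     i ^= i >> 1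
--     lastbit = i & 1
--     output ^= lastbit
--     return (output, lastbit)
-- ===== Notes on version B (the rewrite author's own statement) =====
-- stated objective: alternative
-- what changed: The per-bit while loop computing the parity of the masked 24-bit state is replaced by a fixed logarithmic xor-shift cascade (i ^= i>>16; ... ; i ^= i>>1; i & 1).
import Mathlib
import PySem

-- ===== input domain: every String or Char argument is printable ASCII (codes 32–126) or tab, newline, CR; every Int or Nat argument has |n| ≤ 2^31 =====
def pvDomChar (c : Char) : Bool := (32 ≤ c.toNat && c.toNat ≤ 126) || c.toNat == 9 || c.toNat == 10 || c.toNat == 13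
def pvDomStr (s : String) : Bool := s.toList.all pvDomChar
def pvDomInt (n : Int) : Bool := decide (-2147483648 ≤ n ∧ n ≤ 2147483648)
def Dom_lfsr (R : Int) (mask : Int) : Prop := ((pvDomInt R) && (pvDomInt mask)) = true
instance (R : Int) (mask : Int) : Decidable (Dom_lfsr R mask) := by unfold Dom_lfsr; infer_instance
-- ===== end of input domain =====

-- B replaces A's per-bit parity while-loop over the masked 24-bit state by a fixed xor-shift
-- cascade (i ^= i>>16; …; i ^= i>>1; i & 1); same return value, alternative algorithm.

-- ===== PORT A =====
-- A's while loop scans i bit by bit.  At the call site i = (R & mask) & 0xffffff is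
-- nonnegative, so the loop state i is carried as a Nat (exact: Python's i>>1 on a
-- nonnegative int is Nat floor-halving, and i & 1 is i &&& 1).
def lfsrLoop (i : Nat) (lastbit : Int) : Int :=
  if h : i = 0 then lastbit
  else lfsrLoop (i >>> 1) (PySem.Int.bxor lastbit ((i &&& 1 : Nat) : Int))
termination_by i
decreasing_by simp [Nat.shiftRight_one]; omega

def lfsr (R : Int) (mask : Int) : Int × Int :=
  let output := PySem.Int.band (R <<< (1:Nat)) 16777215
  let i := PySem.Int.band (PySem.Int.band R mask) 16777215
  let lastbit := lfsrLoop i.toNat 0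
  (PySem.Int.bxor output lastbit, lastbit)

-- ===== PORT B =====
def lfsr_alt (R : Int) (mask : Int) : Int × Int :=
  let output := PySem.Int.band (R <<< (1:Nat)) 16777215
  let i0 := PySem.Int.band (PySem.Int.band R mask) 16777215
  let i1 := PySem.Int.bxor i0 (i0 >>> (16:Nat))
  let i2 := PySem.Int.bxor i1 (i1 >>> (8:Nat))
  let i3 := PySem.Int.bxor i2 (i2 >>> (4:Nat))
  let i4 := PySem.Int.bxor i3 (i3 >>> (2:Nat))
  let i5 := PySem.Int.bxor i4 (i4 >>> (1:Nat))
  let lastbit := PySem.Int.band i5 1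
  (PySem.Int.bxor output lastbit, lastbit)

-- ===== PRECONDITION & SPEC =====
def Spec_lfsr (R : Int) (mask : Int) (out : Int × Int) : Prop := out = lfsr_alt R mask
instance (R : Int) (mask : Int) (out : Int × Int) : Decidable (Spec_lfsr R mask out) := by unfold Spec_lfsr; infer_instance

-- ===== CLAIM (what is proved, stated in full; the proofs are below) =====
def Claim_equal_lfsr : Prop := ∀ (R : Int) (mask : Int), Dom_lfsr R mask → Spec_lfsr R mask (lfsr R mask)

-- ===== LEMMAS AND PROOFS =====

-- bit-count of a Nat (popcount), via PySem's Python-exact bit_count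
def bc (n : Nat) : Nat := PySem.Int.bitCount (n : Int)

-- the xor-shift cascade of B as a recursion on the number of rounds: F 5 is shifts 16,8,4,2,1
def F : Nat → Nat → Nat
  | 0, x => x
  | k+1, x => F k (x ^^^ (x >>> 2^k))

theorem bc_zero : bc 0 = 0 := by decide

theorem bc_succ (n : Nat) (h : 0 < n) : bc n = n % 2 + bc (n / 2) :=
  PySem.Int.bitCount_natCast h

-- parity of popcount is xor-additive
theorem bc_xor_parity (a : Nat) : ∀ b : Nat, bc (a ^^^ b) % 2 = (bc a + bc b) % 2 := by
  induction a using Nat.strong_induction_on with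
  | _ a ih =>
    intro b
    by_cases ha : a = 0
    · simp [ha, bc_zero]
    by_cases hb : b = 0
    · simp [hb, bc_zero]
    by_cases hab : a ^^^ b = 0
    · rw [hab, Nat.eq_of_xor_eq_zero hab, bc_zero]
      omega
    rw [bc_succ _ (Nat.pos_of_ne_zero hab), bc_succ a (Nat.pos_of_ne_zero ha),
        bc_succ b (Nat.pos_of_ne_zero hb), Nat.xor_div_two]
    have ih2 := ih (a / 2) (by omega) (b / 2)
    have hm : (a ^^^ b) % 2 = (a % 2) ^^^ (b % 2) := by
      have := Nat.xor_mod_two_pow (a := a) (b := b) (n := 1)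
      simpa using this
    rcases Nat.mod_two_eq_zero_or_one a with h1 | h1 <;>
      rcases Nat.mod_two_eq_zero_or_one b with h2 | h2 <;>
      rw [hm, h1, h2] <;>
      simp only [Nat.xor_self, Nat.zero_xor, Nat.xor_zero] <;> omega

-- popcount splits over a low/high decomposition
theorem bc_add_pow_mul (m : Nat) : ∀ a b : Nat, a < 2^m → bc (a + 2^m * b) = bc a + bc b := by
  induction m with
  | zero =>
    intro a b ha
    interval_cases a
    simp [bc_zero]
  | succ m ih =>
    intro a b ha
    have hX2 : a + 2^(m+1) * b = a + 2 * (2^m * b) := by ring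
    by_cases hX : a + 2^(m+1) * b = 0
    · have hab : a = 0 ∧ 2^m * b = 0 := by omega
      have hb : b = 0 := by
        rcases Nat.mul_eq_zero.mp hab.2 with h | h
        · exact absurd h (Nat.pos_iff_ne_zero.mp (Nat.two_pow_pos m))
        · exact h
      simp [hab.1, hb, bc_zero]
    rw [bc_succ _ (Nat.pos_of_ne_zero hX)]
    have h2 : (a + 2^(m+1) * b) % 2 = a % 2 := by omega
    have h3 : (a + 2^(m+1) * b) / 2 = a / 2 + 2^m * b := by omega
    rw [h2, h3, ih (a / 2) b (by omega)]
    by_cases ha0 : a = 0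
    · simp [ha0, bc_zero]
    · rw [bc_succ a (Nat.pos_of_ne_zero ha0)]; omega

-- low 2m bits = low m bits + 2^m * next m bits
theorem mod_two_pow_split (x m : Nat) :
    x % 2^(2 * m) = x % 2^m + 2^m * (x / 2^m % 2^m) := by
  have h1 : (2:Nat)^(2*m) = 2^m * 2^m := by rw [two_mul, pow_add]
  have h2 : 2^m * (x / 2^m) + x % 2^m = x := Nat.div_add_mod x (2^m)
  have hp : 0 < (2:Nat)^m := Nat.two_pow_pos m
  have hr : x % 2^m < 2^m := Nat.mod_lt _ hp
  have hq : x / 2^m % 2^m < 2^m := Nat.mod_lt _ hp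
  have hmm : (2^m * (x / 2^m)) % (2^m * 2^m) = 2^m * (x / 2^m % 2^m) := Nat.mul_mod_mul_left _ _ _
  have hlt : 2^m * (x / 2^m % 2^m) + x % 2^m < 2^m * 2^m := by
    calc 2^m * (x / 2^m % 2^m) + x % 2^m < 2^m * (x / 2^m % 2^m) + 2^m := by omega
      _ = 2^m * (x / 2^m % 2^m + 1) := (Nat.mul_succ _ _).symm
      _ ≤ 2^m * 2^m := Nat.mul_le_mul_left _ hq
  calc x % 2^(2*m) = (2^m * (x / 2^m) + x % 2^m) % (2^m * 2^m) := by rw [h1, h2]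
    _ = ((2^m * (x / 2^m)) % (2^m * 2^m) + (x % 2^m) % (2^m * 2^m)) % (2^m * 2^m) := by rw [Nat.add_mod]
    _ = (2^m * (x / 2^m % 2^m) + x % 2^m) % (2^m * 2^m) := by
        rw [hmm, Nat.mod_eq_of_lt (lt_of_lt_of_le hr (Nat.le_mul_of_pos_left _ hp))]
    _ = 2^m * (x / 2^m % 2^m) + x % 2^m := Nat.mod_eq_of_lt hlt
    _ = x % 2^m + 2^m * (x / 2^m % 2^m) := by ring

-- invariant of the cascade: bit 0 of F k x is the popcount parity of the low 2^k bits of x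
theorem F_parity : ∀ (k : Nat) (x : Nat), F k x % 2 = bc (x % 2^(2^k)) % 2 := by
  intro k
  induction k with
  | zero =>
    intro x
    show x % 2 = bc (x % 2) % 2
    rcases Nat.mod_two_eq_zero_or_one x with h | h <;> rw [h] <;> decide
  | succ k ih =>
    intro x
    show F k (x ^^^ (x >>> 2^k)) % 2 = _
    rw [ih]
    rw [Nat.xor_mod_two_pow]
    rw [bc_xor_parity]
    have h1 : (2:Nat)^(2^(k+1)) = 2^(2 * 2^k) := by rw [pow_succ, Nat.mul_comm]
    rw [h1, mod_two_pow_split x (2^k),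
        bc_add_pow_mul (2^k) _ _ (Nat.mod_lt _ (Nat.two_pow_pos _)),
        Nat.shiftRight_eq_div_pow]

theorem bxor_bxor_natCast (b : Int) (x y : Nat) :
    PySem.Int.bxor (PySem.Int.bxor b (x:Int)) (y:Int) = PySem.Int.bxor b ((x ^^^ y : Nat):Int) := by
  rcases le_or_gt 0 b with h | h
  · lift b to Nat using h
    simp [Nat.xor_assoc]
  · have h1 : ¬ (0:Int) ≤ b := by omega
    simp only [PySem.Int.bxor, if_pos (Int.natCast_nonneg x), if_pos (Int.natCast_nonneg y), if_neg h1, Int.toNat_natCast]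
    have h2 : ¬ (0:Int) ≤ -(((-b - 1).toNat ^^^ x : Nat) : Int) - 1 := by
      have := Int.natCast_nonneg (((-b - 1).toNat ^^^ x : Nat)); omega
    rw [if_neg h2]
    have h3 : (-(-(((-b - 1).toNat ^^^ x : Nat) : Int) - 1) - 1).toNat = (-b - 1).toNat ^^^ x := by omega
    rw [h3, Nat.xor_assoc, if_pos (Int.natCast_nonneg (x ^^^ y))]

-- A's loop computes the popcount parity, xor-ed into the accumulator
theorem loop_parity (n : Nat) : ∀ b : Int, lfsrLoop n b = PySem.Int.bxor b ((bc n % 2 : Nat) : Int) := by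
  induction n using Nat.strong_induction_on with
  | _ n ih =>
    intro b
    rw [lfsrLoop]
    by_cases h : n = 0
    · simp [h, bc_zero]
    · rw [dif_neg h, ih (n >>> 1) (by simp [Nat.shiftRight_one]; omega),
          bxor_bxor_natCast, Nat.shiftRight_one, Nat.and_one_is_mod]
      congr 2
      rw [bc_succ n (Nat.pos_of_ne_zero h)]
      rcases Nat.mod_two_eq_zero_or_one n with h1 | h1 <;>
        rcases Nat.mod_two_eq_zero_or_one (bc (n / 2)) with h2 | h2 <;>
        rw [h1, h2] <;>
        simp only [Nat.xor_self, Nat.zero_xor, Nat.xor_zero] <;> omega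


theorem band_le_right_of_nonneg (a b : Int) (hb : 0 ≤ b) : PySem.Int.band a b ≤ b := by
  unfold PySem.Int.band
  have h1 := Nat.and_le_right (n := a.toNat) (m := b.toNat)
  split_ifs <;> omega

-- the two lastbits agree on any masked (24-bit) state
theorem key (n : Nat) (hn : n < 2^24) :
    lfsrLoop n 0 =
      PySem.Int.band
        (let i1 := PySem.Int.bxor (n:Int) ((n:Int) >>> (16:Nat))
         let i2 := PySem.Int.bxor i1 (i1 >>> (8:Nat))
         let i3 := PySem.Int.bxor i2 (i2 >>> (4:Nat))
         let i4 := PySem.Int.bxor i3 (i3 >>> (2:Nat))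
         PySem.Int.bxor i4 (i4 >>> (1:Nat))) 1 := by
  rw [loop_parity n 0]
  have h1 : (1:Int) = ((1:Nat):Int) := rfl
  rw [h1]
  simp only [← Int.natCast_shiftRight, PySem.Int.bxor_natCast, PySem.Int.band_natCast]
  rw [PySem.Int.bxor_comm, PySem.Int.bxor_zero]
  congr 1
  have hF : F 5 n = (let i1 := n ^^^ n >>> 16
    let i2 := i1 ^^^ i1 >>> 8
    let i3 := i2 ^^^ i2 >>> 4
    let i4 := i3 ^^^ i3 >>> 2
    i4 ^^^ i4 >>> 1) := by norm_num [F]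
  rw [← hF, Nat.and_one_is_mod, F_parity 5 n]
  have : n % 2^(2^5) = n := Nat.mod_eq_of_lt (by omega)
  rw [this]

-- ===== VERDICT (by name: the statement is the Claim_ definition above) =====
theorem lfsr_spec : Claim_equal_lfsr := by
  intro R mask _
  unfold Spec_lfsr
  show lfsr R mask = lfsr_alt R mask
  simp only [lfsr, lfsr_alt]
  have h0 : 0 ≤ PySem.Int.band (PySem.Int.band R mask) 16777215 := by
    rw [PySem.Int.band_comm]
    exact PySem.Int.band_nonneg_of_nonneg_left _ (by norm_num)
  have h1 := band_le_right_of_nonneg (PySem.Int.band R mask) 16777215 (by norm_num)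
  set i := PySem.Int.band (PySem.Int.band R mask) 16777215 with hidef
  obtain ⟨n, hn⟩ : ∃ n : Nat, i = (n:Int) := ⟨i.toNat, (Int.toNat_of_nonneg h0).symm⟩
  rw [hn]
  have hlt : n < 2^24 := by
    have : (n:Int) ≤ 16777215 := hn ▸ h1
    exact_mod_cast (by omega : (n:Int) < 2^24)
  rw [Int.toNat_natCast]
  rw [key n hlt]
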